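-- pv_equiv track=rewrite | github.com/cfarley2/BabyBeats | HeartSounds.py | generate_training_labels
-- ===== SOURCE A (Python) =====
-- def generate_training_labels(df, s1, s2):
--     xlabels = []
--     ylabels = []
--     current = 'Systole'
--     for i in range (0, len(df)):
--         xlabels.append(df[i])
--         if i in s1:
--             ylabels.append('S1')
--             current = 'Systole'
--         elif i in s2:
--             ylabels.append('S2')
--             current = 'Diastole'
--         else:
--             ylabels.append(current)
--     return xlabels, ylabels
-- ===== SOURCE B (Python) =====
-- def generate_training_labels(df, s1, s2):
--     n = len(df)
--     s1set = set(s1)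
--     s2set = set(s2)
--
--     def state_before(i):
--         # the nearest earlier event decides the phase; with no earlier event it is 'Systole'
--         for j in range(i - 1, -1, -1):
--             if j in s1set:
--                 return 'Systole'
--             if j in s2set:
--                 return 'Diastole'
--         return 'Systole'
--
--     ylabels = ['S1' if i in s1set
--                else 'S2' if i in s2set
--                else state_before(i)
--                for i in range(n)]
--     return list(df), ylabels
-- ===== Notes on version B (the rewrite author's own statement) =====
-- stated objective: alternative
-- what changed: Replaces the forward state-machine (a 'current' label carried through the loop) with a stateless per-index rule: each non-event index searches backward for the nearest earlier event to decide its phase, with event membership taken from prebuilt sets.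
import Mathlib
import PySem

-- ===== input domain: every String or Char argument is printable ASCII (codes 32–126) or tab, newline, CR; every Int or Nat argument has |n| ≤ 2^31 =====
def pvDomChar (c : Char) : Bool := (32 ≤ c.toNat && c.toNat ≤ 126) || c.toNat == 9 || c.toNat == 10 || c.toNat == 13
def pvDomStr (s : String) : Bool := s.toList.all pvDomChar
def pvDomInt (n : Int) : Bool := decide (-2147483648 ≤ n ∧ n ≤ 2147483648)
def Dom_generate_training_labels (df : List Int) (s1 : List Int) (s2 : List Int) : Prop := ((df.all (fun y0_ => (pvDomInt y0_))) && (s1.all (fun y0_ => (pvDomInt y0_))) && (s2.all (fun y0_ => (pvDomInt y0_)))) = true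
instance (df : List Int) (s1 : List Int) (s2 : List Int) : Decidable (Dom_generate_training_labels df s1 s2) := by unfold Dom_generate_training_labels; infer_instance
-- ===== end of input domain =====

-- B replaces A's forward state machine by a stateless per-index backward search for
-- the nearest earlier event (objective: alternative decomposition, same results).

-- ===== PORT A =====
-- literal port of A: one forward pass carrying (xlabels, ylabels, current);
-- df[i] is ported as pyGetD df i 0 — i always lies in range, so the default is never used
def generate_training_labels (df : List Int) (s1 : List Int) (s2 : List Int) : List Int × List String :=
  let r := (PySem.List.pyRange 0 (df.length : Int) 1).foldl
    (fun (acc : List Int × List String × String) (i : Int) =>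
      let xlabels := acc.1 ++ [PySem.List.pyGetD df i 0]
      if s1.contains i then (xlabels, acc.2.1 ++ ["S1"], "Systole")
      else if s2.contains i then (xlabels, acc.2.1 ++ ["S2"], "Diastole")
      else (xlabels, acc.2.1 ++ [acc.2.2], acc.2.2))
    ([], [], "Systole")
  (r.1, r.2.1)

-- ===== PORT B =====
-- state_before(i): scan j = i-1, i-2, …, 0 for the nearest earlier event
def gtl_state_before (t1 t2 : PySem.Set Int) : Nat → String
  | 0 => "Systole"
  | j + 1 =>
    if PySem.Set.contains t1 (j : Int) then "Systole"
    else if PySem.Set.contains t2 (j : Int) then "Diastole"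
    else gtl_state_before t1 t2 j

def generate_training_labels_alt (df : List Int) (s1 : List Int) (s2 : List Int) : List Int × List String :=
  let t1 := PySem.Set.ofList s1
  let t2 := PySem.Set.ofList s2
  let ylabels := (PySem.List.pyRange 0 (df.length : Int) 1).map (fun i =>
    if PySem.Set.contains t1 i then "S1"
    else if PySem.Set.contains t2 i then "S2"
    else gtl_state_before t1 t2 i.toNat)
  (df, ylabels)

-- ===== PRECONDITION & SPEC =====
def Spec_generate_training_labels (df : List Int) (s1 : List Int) (s2 : List Int) (out : List Int × List String) : Prop := out = generate_training_labels_alt df s1 s2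
instance (df : List Int) (s1 : List Int) (s2 : List Int) (out : List Int × List String) : Decidable (Spec_generate_training_labels df s1 s2 out) := by unfold Spec_generate_training_labels; infer_instance

-- ===== CLAIM (what is proved, stated in full; the proofs are below) =====
def Claim_equal_generate_training_labels : Prop := ∀ (df : List Int) (s1 : List Int) (s2 : List Int), Dom_generate_training_labels df s1 s2 → Spec_generate_training_labels df s1 s2 (generate_training_labels df s1 s2)

-- ===== LEMMAS AND PROOFS =====

-- A's loop over range(0, n) computes: the first n elements of df (with default),
-- B's per-index labels, and the running state gtl_state_before n.
theorem gtl_loop (df s1 s2 : List Int) (n : Nat) :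
    (PySem.List.pyRange 0 (n : Int) 1).foldl
      (fun (acc : List Int × List String × String) (i : Int) =>
        let xlabels := acc.1 ++ [PySem.List.pyGetD df i 0]
        if s1.contains i then (xlabels, acc.2.1 ++ ["S1"], "Systole")
        else if s2.contains i then (xlabels, acc.2.1 ++ ["S2"], "Diastole")
        else (xlabels, acc.2.1 ++ [acc.2.2], acc.2.2))
      ([], [], "Systole")
    = ((PySem.List.pyRange 0 (n : Int) 1).map (fun i => PySem.List.pyGetD df i 0),
       (PySem.List.pyRange 0 (n : Int) 1).map (fun i =>
         if PySem.Set.contains (PySem.Set.ofList s1) i then "S1"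
         else if PySem.Set.contains (PySem.Set.ofList s2) i then "S2"
         else gtl_state_before (PySem.Set.ofList s1) (PySem.Set.ofList s2) i.toNat),
       gtl_state_before (PySem.Set.ofList s1) (PySem.Set.ofList s2) n) := by
  induction n with
  | zero =>
    rw [show ((0 : Nat) : Int) = 0 from rfl, PySem.List.pyRange_one_eq_nil (le_refl 0)]
    rfl
  | succ n ih =>
    have hsplit : PySem.List.pyRange 0 ((n + 1 : Nat) : Int) 1
        = PySem.List.pyRange 0 (n : Int) 1 ++ [(n : Int)] := by
      push_cast
      exact PySem.List.pyRange_one_succ_right (Int.natCast_nonneg n)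
    rw [hsplit, List.foldl_append, ih, List.foldl_cons, List.foldl_nil,
      List.map_append, List.map_append]
    by_cases h1 : ((n : Nat) : Int) ∈ s1 <;> by_cases h2 : ((n : Nat) : Int) ∈ s2 <;>
      simp [h1, h2, gtl_state_before]

-- ===== VERDICT (by name: the statement is the Claim_ definition above) =====
theorem generate_training_labels_spec : Claim_equal_generate_training_labels := by
  intro df s1 s2 _
  show _ = _
  unfold generate_training_labels generate_training_labels_alt
  rw [gtl_loop, PySem.List.map_pyGetD_pyRange_zero']
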